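-- pv_equiv track=rewrite | github.com/nmrs/sotd_pipeline | sotd/report/table_size_limiter.py | apply_row_limit
-- ===== SOURCE A (Python) =====
-- from typing import Any, Dict, List
--
-- def apply_row_limit(data: List[Dict[str, Any]], max_rows: int) -> List[Dict[str, Any]]:
--     """Apply row limit with smart tie handling.
--
--     Args:
--         data: List of data records
--         max_rows: Maximum number of rows
--
--     Returns:
--         Data with row limit applied
--     """
--     if not data or max_rows <= 0:
--         return []
--
--     if len(data) <= max_rows:
--         return data
--
--     # Find the cutoff point that respects ties
--     cutoff_rank = data[max_rows - 1]["rank"]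
--
--     # Check if including the tie would exceed the limit
--     tie_count = 0
--     for item in data:
--         if item["rank"] == cutoff_rank:
--             tie_count += 1
--
--     # If including the tie would exceed the limit by more than 50%, stop before it
--     if tie_count > 1:
--         # Count how many items we would have if we included the tie
--         items_up_to_cutoff = 0
--         for item in data:
--             if item["rank"] <= cutoff_rank:
--                 items_up_to_cutoff += 1
--             else:
--                 break
--
--         # Allow ties if they don't exceed the limit by more than 50%
--         max_allowed = max_rows + (max_rows // 2)
--         if items_up_to_cutoff > max_allowed:
--             # Find the rank before the tie
--             for i in range(max_rows - 1, -1, -1):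
--                 if data[i]["rank"] < cutoff_rank:
--                     cutoff_rank = data[i]["rank"]
--                     break
--
--     # Include all items up to and including the cutoff rank
--     result = []
--     for item in data:
--         if item["rank"] <= cutoff_rank:
--             result.append(item)
--         else:
--             break
--
--     return result
-- ===== SOURCE B (Python) =====
-- def _bisect_gt(pmax, t):
--     """First index i with pmax[i] > t; pmax is nondecreasing, so binary search."""
--     lo, hi = 0, len(pmax)
--     while lo < hi:
--         mid = (lo + hi) // 2
--         if pmax[mid] <= t:
--             lo = mid + 1
--         else:
--             hi = mid
--     return lo
--
--
-- def apply_row_limit(data, max_rows):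
--     if max_rows <= 0 or not data:
--         return []
--     if len(data) <= max_rows:
--         return data
--     cutoff = data[max_rows - 1]["rank"]
--     # Prefix-maximum array of the rank column: pmax[i] = max(rank[0..i]).
--     # It is nondecreasing, so "length of the prefix with rank <= t" becomes a
--     # binary search for the first prefix maximum above t.
--     pmax = []
--     for row in data:
--         r = row["rank"]
--         pmax.append(r if not pmax else max(pmax[-1], r))
--     ties = sum(1 for row in data if row["rank"] == cutoff)
--     if ties > 1 and _bisect_gt(pmax, cutoff) > max_rows + max_rows // 2:
--         fallback = None
--         for row in data[:max_rows]:
--             if row["rank"] < cutoff: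
--                 fallback = row["rank"]
--         if fallback is not None:
--             cutoff = fallback
--     return data[:_bisect_gt(pmax, cutoff)]
-- ===== Notes on version B (the rewrite author's own statement) =====
-- stated objective: alternative
-- what changed: B builds a prefix-maximum array of the rank column (nondecreasing by construction) and turns every 'longest prefix with rank <= t' question into a binary search for the first prefix maximum above t, finding the fallback cutoff with a forward last-match scan instead of A's backward index loop; the result is a single bounded slice instead of A's append-with-break loop.
import Mathlib
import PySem

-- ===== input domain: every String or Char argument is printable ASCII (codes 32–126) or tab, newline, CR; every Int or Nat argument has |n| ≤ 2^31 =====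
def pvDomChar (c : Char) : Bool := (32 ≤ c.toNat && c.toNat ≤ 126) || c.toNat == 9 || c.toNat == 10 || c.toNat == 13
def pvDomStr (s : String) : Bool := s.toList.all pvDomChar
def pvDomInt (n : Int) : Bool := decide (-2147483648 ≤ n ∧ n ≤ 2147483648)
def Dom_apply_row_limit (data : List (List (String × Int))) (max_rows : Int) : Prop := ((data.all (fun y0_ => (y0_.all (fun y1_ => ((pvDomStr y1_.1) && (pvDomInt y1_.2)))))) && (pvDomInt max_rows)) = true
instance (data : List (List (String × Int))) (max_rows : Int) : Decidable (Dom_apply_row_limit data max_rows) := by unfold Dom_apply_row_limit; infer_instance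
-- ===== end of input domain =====

-- B replaces A's append-with-break / backward-index scans by a prefix-maximum array of the
-- rank column plus binary search (objective: alternative, same asymptotic cost). A may return
-- its argument `data` itself (no copy) on the short path; equivalence is about the value.

-- ===== PORT A =====
-- item["rank"]: first-match association-list lookup; default 0 is never used inside
-- Pre_apply_row_limit (every accessed row carries the key there).
def pvRank (row : List (String × Int)) : Int := (row.lookup "rank").getD 0

-- 'tie_count' loop of A
def pvCountRank (cutoff : Int) (data : List (List (String × Int))) : Int :=
  data.foldl (fun acc item => if pvRank item == cutoff then acc + 1 else acc) 0

-- 'items_up_to_cutoff' loop of A (counts, breaks on first rank > cutoff)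
def pvPrefixCount (cutoff : Int) : List (List (String × Int)) → Int
  | [] => 0
  | item :: rest => if pvRank item ≤ cutoff then 1 + pvPrefixCount cutoff rest else 0

-- 'for i in range(max_rows - 1, -1, -1)' of A: first index (from i downwards) whose rank
-- is < cutoff sets the new cutoff; all indices probed lie in range inside Pre_.
def pvDownFind (data : List (List (String × Int))) (cutoff : Int) : Nat → Int
  | 0 => if pvRank (data.getD 0 []) < cutoff then pvRank (data.getD 0 []) else cutoff
  | i + 1 =>
      if pvRank (data.getD (i + 1) []) < cutoff then pvRank (data.getD (i + 1) [])
      else pvDownFind data cutoff i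

-- final 'result' loop of A (append while rank ≤ cutoff, break on first above)
def pvTakeRows (cutoff : Int) : List (List (String × Int)) → List (List (String × Int))
  | [] => []
  | item :: rest => if pvRank item ≤ cutoff then item :: pvTakeRows cutoff rest else []

def apply_row_limit (data : List (List (String × Int))) (max_rows : Int) : List (List (String × Int)) :=
  if data = [] ∨ max_rows ≤ 0 then []
  else if PySem.List.len data ≤ max_rows then data
  else
    let cutoff_rank := pvRank (PySem.List.pyGetD data (max_rows - 1) [])
    let tie_count := pvCountRank cutoff_rank data
    let cutoff_rank :=
      if tie_count > 1 then
        let items_up_to_cutoff := pvPrefixCount cutoff_rank data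
        let max_allowed := max_rows + PySem.Int.floordiv max_rows 2
        if items_up_to_cutoff > max_allowed then
          pvDownFind data cutoff_rank (max_rows - 1).toNat
        else cutoff_rank
      else cutoff_rank
    pvTakeRows cutoff_rank data

-- ===== PORT B =====
-- '_bisect_gt' of Source B: binary search for the first index with pmax[i] > t
def pvBisectAux (l : List Int) (t : Int) (lo hi : Nat) : Nat :=
  if h : lo < hi then
    if l.getD ((lo + hi) / 2) 0 ≤ t then pvBisectAux l t ((lo + hi) / 2 + 1) hi
    else pvBisectAux l t lo ((lo + hi) / 2)
  else lo
termination_by hi - lo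
decreasing_by
  all_goals
    have h1 : lo ≤ (lo + hi) / 2 := (Nat.le_div_iff_mul_le (by omega)).mpr (by omega)
    have h2 : (lo + hi) / 2 < hi := Nat.div_lt_of_lt_mul (by omega)
    omega

def pvBisectGT (l : List Int) (t : Int) : Nat := pvBisectAux l t 0 l.length

-- the 'pmax.append(r if not pmax else max(pmax[-1], r))' body of Source B's loop
def pvPMStep (acc : List Int) (row : List (String × Int)) : List Int :=
  acc ++ [match acc.getLast? with | none => pvRank row | some h => max h (pvRank row)]

def apply_row_limit_alt (data : List (List (String × Int))) (max_rows : Int) : List (List (String × Int)) :=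
  if max_rows ≤ 0 ∨ data = [] then []
  else if PySem.List.len data ≤ max_rows then data
  else
    let cutoff := pvRank (PySem.List.pyGetD data (max_rows - 1) [])
    let pmax := data.foldl pvPMStep []
    let ties : Int := List.countP (fun row => pvRank row == cutoff) data
    let cutoff :=
      if ties > 1 ∧ (pvBisectGT pmax cutoff : Int) > max_rows + PySem.Int.floordiv max_rows 2 then
        let fb := (PySem.List.slice data none (some max_rows)).foldl
          (fun fb row => if pvRank row < cutoff then some (pvRank row) else fb) (none : Option Int)
        fb.getD cutoff
      else cutoff
    PySem.List.slice data none (some ((pvBisectGT pmax cutoff : Nat) : Int))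

-- ===== PRECONDITION & SPEC =====
-- Pre_ excludes exactly the inputs on which A raises KeyError: past the two early returns
-- A reads item["rank"] of every record, so every row must carry the "rank" key there.
def Pre_apply_row_limit (data : List (List (String × Int))) (max_rows : Int) : Prop :=
  max_rows ≤ 0 ∨ (data.length : Int) ≤ max_rows ∨
    ∀ row ∈ data, (row.lookup "rank").isSome = true
instance (data : List (List (String × Int))) (max_rows : Int) : Decidable (Pre_apply_row_limit data max_rows) := by unfold Pre_apply_row_limit; infer_instance
def pvWitness_apply_row_limit : (List (List (String × Int))) × Int :=
  ([[("rank", 1)], [("rank", 1)], [("rank", 2)]], 2)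

def Spec_apply_row_limit (data : List (List (String × Int))) (max_rows : Int) (out : List (List (String × Int))) : Prop := out = apply_row_limit_alt data max_rows
instance (data : List (List (String × Int))) (max_rows : Int) (out : List (List (String × Int))) : Decidable (Spec_apply_row_limit data max_rows out) := by unfold Spec_apply_row_limit; infer_instance

-- ===== CLAIM (what is proved, stated in full; the proofs are below) =====
def Claim_equal_apply_row_limit : Prop := ∀ (data : List (List (String × Int))) (max_rows : Int), Dom_apply_row_limit data max_rows → Pre_apply_row_limit data max_rows → Spec_apply_row_limit data max_rows (apply_row_limit data max_rows)

-- ===== LEMMAS AND PROOFS =====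

-- canonical quantity: length of the longest prefix of a rank list with entries ≤ t
def pvPrefixLen (t : Int) : List Int → Nat
  | [] => 0
  | r :: rest => if r ≤ t then pvPrefixLen t rest + 1 else 0

-- specification-side prefix maxima (Source B's pmax list), carrying the running maximum
def pvPMRec : Option Int → List Int → List Int
  | _, [] => []
  | none, r :: rest => r :: pvPMRec (some r) rest
  | some h, r :: rest => max h r :: pvPMRec (some (max h r)) rest

theorem pvPrefixLen_le (t : Int) (l : List Int) : pvPrefixLen t l ≤ l.length := by
  induction l with
  | nil => simp [pvPrefixLen]
  | cons r rest ih => simp only [pvPrefixLen, List.length_cons]; split <;> omega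

theorem pvPrefixLen_lt (t : Int) (l : List Int) (j : Nat) (hj : j < pvPrefixLen t l) :
    l.getD j 0 ≤ t := by
  induction l generalizing j with
  | nil => simp [pvPrefixLen] at hj
  | cons r rest ih =>
      simp only [pvPrefixLen] at hj
      split at hj
      · cases j with
        | zero => simpa
        | succ i => exact ih i (by omega)
      · omega

theorem pvPrefixLen_at (t : Int) (l : List Int) (h : pvPrefixLen t l < l.length) :
    t < l.getD (pvPrefixLen t l) 0 := by
  induction l with
  | nil => simp at h
  | cons r rest ih =>
      by_cases hr : r ≤ t
      · simp only [pvPrefixLen, hr, if_true, List.length_cons] at h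
        simp only [pvPrefixLen, hr, if_true, List.getD_cons_succ]
        exact ih (by omega)
      · simp [pvPrefixLen, hr]
        omega

theorem pvPMRec_length (h0 : Option Int) (l : List Int) : (pvPMRec h0 l).length = l.length := by
  induction l generalizing h0 with
  | nil => cases h0 <;> rfl
  | cons r rest ih => cases h0 <;> simp [pvPMRec, ih]

theorem pvPMRec_le_iff (t : Int) (l : List Int) (h0 : Option Int) (j : Nat) (hj : j < l.length) :
    ((pvPMRec h0 l).getD j 0 ≤ t ↔
      (∀ h, h0 = some h → h ≤ t) ∧ ∀ i, i ≤ j → l.getD i 0 ≤ t) := by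
  induction l generalizing h0 j with
  | nil => simp at hj
  | cons r rest ih =>
      have key : ∀ v, (h0 = none → v = r) → (∀ h, h0 = some h → v = max h r) →
          ((v :: pvPMRec (some v) rest).getD j 0 ≤ t ↔
            (∀ h, h0 = some h → h ≤ t) ∧ ∀ i, i ≤ j → (r :: rest).getD i 0 ≤ t) := by
        intro v hv1 hv2
        cases j with
        | zero =>
            cases h0 with
            | none => simp [hv1 rfl]
            | some h => simp [hv2 h rfl, Nat.le_zero]
        | succ i =>
            rw [List.getD_cons_succ, ih (some v) i (by simpa using hj)]
            have hv : v ≤ t ↔ (∀ h, h0 = some h → h ≤ t) ∧ r ≤ t := by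
              cases h0 with
              | none => simp [hv1 rfl]
              | some h => simp [hv2 h rfl, max_le_iff]
            constructor
            · rintro ⟨hvt, hrest⟩
              have := hv.mp (hvt v rfl)
              refine ⟨this.1, ?_⟩
              intro k hk
              cases k with
              | zero => simpa using this.2
              | succ k' => simpa using hrest k' (by omega)
            · rintro ⟨hh, hall⟩
              refine ⟨fun w hw => ?_, fun k hk => ?_⟩
              · cases hw
                exact hv.mpr ⟨hh, by simpa using hall 0 (by omega)⟩
              · simpa using hall (k + 1) (by omega)
      cases h0 with
      | none => exact key r (fun _ => rfl) (fun h hc => by cases hc)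
      | some h => exact key (max h r) (fun hc => by cases hc) (fun h' hc => by cases hc; rfl)

-- Source B's pmax loop equals the spec-side prefix maxima
theorem foldl_pvPMStep (data : List (List (String × Int))) :
    ∀ acc : List Int, data.foldl pvPMStep acc = acc ++ pvPMRec acc.getLast? (data.map pvRank) := by
  induction data with
  | nil => intro acc; cases h : acc.getLast? <;> simp [pvPMRec]
  | cons row rest ih =>
      intro acc
      rw [List.foldl_cons, ih]
      cases h : acc.getLast? with
      | none =>
          have hacc : acc = [] := List.getLast?_eq_none_iff.mp h
          simp [pvPMStep, hacc, pvPMRec]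
      | some v =>
          simp only [pvPMStep, h, List.map_cons, pvPMRec]
          rw [List.getLast?_append]
          simp

-- binary search correctness: if k separates the ≤-t prefix from the >-t suffix, the search finds k
theorem pvBisectAux_eq (l : List Int) (t : Int) (k : Nat)
    (hk : k ≤ l.length)
    (hlow : ∀ j, j < k → l.getD j 0 ≤ t)
    (hhigh : ∀ j, k ≤ j → j < l.length → t < l.getD j 0) :
    ∀ lo hi, lo ≤ k → k ≤ hi → hi ≤ l.length → pvBisectAux l t lo hi = k := by
  have main : ∀ fuel lo hi, hi - lo ≤ fuel → lo ≤ k → k ≤ hi → hi ≤ l.length →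
      pvBisectAux l t lo hi = k := by
    intro fuel
    induction fuel with
    | zero =>
        intro lo hi h0 hlo hhi hlen
        rw [pvBisectAux]
        split
        · rename_i hlt; omega
        · omega
    | succ f ih =>
        intro lo hi h0 hlo hhi hlen
        rw [pvBisectAux]
        split
        · rename_i hlt
          have h1 : lo ≤ (lo + hi) / 2 := (Nat.le_div_iff_mul_le (by omega)).mpr (by omega)
          have h2 : (lo + hi) / 2 < hi := Nat.div_lt_of_lt_mul (by omega)
          split
          · rename_i hle
            have hmk : (lo + hi) / 2 < k := by
              by_contra hc
              exact absurd hle (by simpa using hhigh _ (by omega) (by omega))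
            exact ih _ _ (by omega) (by omega) hhi hlen
          · rename_i hgt
            have hmk : k ≤ (lo + hi) / 2 := by
              by_contra hc
              exact hgt (hlow _ (by omega))
            exact ih _ _ (by omega) hlo (by omega) (by omega)
        · omega
  exact fun lo hi h1 h2 h3 => main (hi - lo) lo hi le_rfl h1 h2 h3

-- master lemma: the binary search on the prefix maxima computes the prefix length
theorem pvBisectGT_pm (data : List (List (String × Int))) (t : Int) :
    pvBisectGT (data.foldl pvPMStep []) t = pvPrefixLen t (data.map pvRank) := by
  rw [foldl_pvPMStep data []]
  simp only [List.nil_append, List.getLast?_nil]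
  set ranks := data.map pvRank with hranks
  have hlen : (pvPMRec none ranks).length = ranks.length := pvPMRec_length none ranks
  refine pvBisectAux_eq _ t (pvPrefixLen t ranks) (by rw [hlen]; exact pvPrefixLen_le t ranks)
    ?_ ?_ 0 _ (by omega) (by rw [hlen]; exact pvPrefixLen_le t ranks) (by omega)
  · intro j hj
    have hjlen : j < ranks.length := lt_of_lt_of_le hj (pvPrefixLen_le t ranks)
    rw [pvPMRec_le_iff t ranks none j hjlen]
    exact ⟨fun h hc => by simp at hc, fun i hi => pvPrefixLen_lt t ranks i (by omega)⟩
  · intro j hj hjlen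
    rw [hlen] at hjlen
    by_contra hc
    push_neg at hc
    have := (pvPMRec_le_iff t ranks none j hjlen).mp hc
    have hklen : pvPrefixLen t ranks < ranks.length := by omega
    exact absurd (this.2 _ hj) (by simpa using pvPrefixLen_at t ranks hklen)

-- A-side bridges
theorem pvPrefixCount_eq (c : Int) (data : List (List (String × Int))) :
    pvPrefixCount c data = (pvPrefixLen c (data.map pvRank) : Int) := by
  induction data with
  | nil => rfl
  | cons item rest ih =>
      simp only [pvPrefixCount, pvPrefixLen, List.map_cons]
      split <;> simp [ih]; omega

theorem pvTakeRows_eq (c : Int) (data : List (List (String × Int))) :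
    pvTakeRows c data = data.take (pvPrefixLen c (data.map pvRank)) := by
  induction data with
  | nil => rfl
  | cons item rest ih =>
      simp only [pvTakeRows, pvPrefixLen, List.map_cons]
      split <;> simp [ih]

theorem pvCountRank_eq (c : Int) (data : List (List (String × Int))) :
    pvCountRank c data = (List.countP (fun row => pvRank row == c) data : Int) := by
  simp only [pvCountRank, PySem.List.foldl_if_add_one (fun item => pvRank item == c)]
  simp [List.countP]

theorem rev_take_succ (l : List (List (String × Int))) (k : Nat) (hk : k < l.length) :
    (l.take (k + 1)).reverse = l[k] :: (l.take k).reverse := by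
  rw [List.take_add_one]
  simp [List.getElem?_eq_getElem hk]

theorem pvDownFind_eq (data : List (List (String × Int))) (c : Int) (k : Nat)
    (hk : k < data.length) :
    pvDownFind data c k =
      (((data.take (k + 1)).reverse.find? (fun row => decide (pvRank row < c))).map pvRank).getD c := by
  induction k with
  | zero =>
      rw [rev_take_succ _ 0 (by simpa using hk)]
      by_cases h : pvRank data[0] < c <;>
        simp [pvDownFind, List.getD_eq_getElem?_getD, List.getElem?_eq_getElem hk, h]
  | succ i ih =>
      rw [rev_take_succ _ (i + 1) (by simpa using hk)]
      by_cases h : pvRank data[i + 1] < c <;>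
        simp [pvDownFind, List.getD_eq_getElem?_getD, List.getElem?_eq_getElem hk, h,
          ih (Nat.lt_of_succ_lt hk)]

-- B's forward last-match fallback loop equals first match of the reversed prefix
theorem foldl_last_match (c : Int) (l : List (List (String × Int))) :
    ∀ fb : Option Int,
      l.foldl (fun fb row => if pvRank row < c then some (pvRank row) else fb) fb =
        match l.reverse.find? (fun row => decide (pvRank row < c)) with
        | some row => some (pvRank row)
        | none => fb := by
  induction l with
  | nil => intro fb; rfl
  | cons row rest ih =>
      intro fb
      rw [List.foldl_cons, ih]
      rw [List.reverse_cons, List.find?_append]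
      by_cases h : pvRank row < c <;>
        cases hf : rest.reverse.find? (fun row => decide (pvRank row < c)) <;>
          simp [h, hf, Option.or]

theorem apply_row_limit_spec : Claim_equal_apply_row_limit := by
  unfold Claim_equal_apply_row_limit
  intro data m _ _
  unfold Spec_apply_row_limit apply_row_limit apply_row_limit_alt
  by_cases h1 : data = [] ∨ m ≤ 0
  · rw [if_pos h1, if_pos (or_comm.mp h1)]
  · rw [if_neg h1, if_neg (fun hc => h1 (or_comm.mp hc))]
    by_cases h2 : PySem.List.len data ≤ m
    · rw [if_pos h2, if_pos h2]
    · rw [if_neg h2, if_neg h2]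
      have hm : 0 < m := by rcases not_or.mp h1 with ⟨_, h⟩; omega
      have hlen : m < (data.length : Int) := by
        simp [PySem.List.len_eq] at h2; omega
      set c := pvRank (PySem.List.pyGetD data (m - 1) []) with hc
      set ranks := data.map pvRank with hranks
      -- common quantities
      have hbis : ∀ t : Int, pvBisectGT (data.foldl pvPMStep []) t = pvPrefixLen t ranks :=
        fun t => pvBisectGT_pm data t
      have hslice : PySem.List.slice data none (some m) = data.take m.toNat :=
        PySem.List.slice_to _ (by omega)
      have hfb :
          (PySem.List.slice data none (some m)).foldl
              (fun fb row => if pvRank row < c then some (pvRank row) else fb) none =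
            match (data.take m.toNat).reverse.find? (fun row => decide (pvRank row < c)) with
            | some row => some (pvRank row)
            | none => none := by
        rw [hslice, foldl_last_match]
      have hdown : pvDownFind data c (m - 1).toNat =
          (((data.take m.toNat).reverse.find? (fun row => decide (pvRank row < c))).map
            pvRank).getD c := by
        have hk : (m - 1).toNat < data.length := by omega
        have h1' : (m - 1).toNat + 1 = m.toNat := by omega
        rw [pvDownFind_eq data c _ hk, h1']
      -- both sides reduce to take (pvPrefixLen cutoff' ranks) for the same cutoff'
      simp only [pvCountRank_eq, pvPrefixCount_eq, pvTakeRows_eq, hbis, hfb, hdown]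
      by_cases ht : (List.countP (fun row => pvRank row == c) data : Int) > 1
      · by_cases hp : (pvPrefixLen c ranks : Int) > m + PySem.Int.floordiv m 2
        · rw [if_pos ht, if_pos hp, if_pos ⟨ht, hp⟩]
          cases hf : (data.take m.toNat).reverse.find? (fun row => decide (pvRank row < c)) with
          | none =>
              simp only [hf, Option.getD_none, Option.map_none]
              rw [PySem.List.slice_to _ (by positivity)]
              simp [hranks]
          | some row =>
              simp only [hf, Option.getD_some, Option.map_some]
              rw [PySem.List.slice_to _ (by positivity)]
              simp [hranks]
        · rw [if_pos ht, if_neg hp, if_neg (by tauto)]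
          rw [PySem.List.slice_to _ (by positivity)]
          simp [hranks]
      · rw [if_neg ht, if_neg (by tauto)]
        rw [PySem.List.slice_to _ (by positivity)]
        simp [hranks]
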